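-- pv_equiv track=rewrite | github.com/dafeigediaozhatian/Image-Processing-v2 | 6_Image_zone_fusion.py | compute_point
-- ===== SOURCE A (Python) =====
-- def compute_counts(image):
--     dict_rgb = {}
--     image = list(image)
--
--     for i in image:
--         for j in i:
--             if tuple(j) not in dict_rgb:
--                 dict_rgb[tuple(j)] = 1
--             else:
--                 dict_rgb[tuple(j)] += 1
--     return dict_rgb
--
-- def compute_point(image):
--     dict_point = {}
--     dict_rgb = compute_counts(image)
--     image = list(image)
--
--     for x in range(len(image)):
--         for y in range(len(image[0])):
--             if tuple(image[x][y]) not in dict_point: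
--                 dict_point[tuple(image[x][y])] = [x + 1, y + 1]
--             else:
--                 dict_point[tuple(image[x][y])][0] += (x + 1)
--                 dict_point[tuple(image[x][y])][1] += (y + 1)
--
--     for index in dict_point:
--         for i in range(len(dict_point[index])):
--             dict_point[index][i] = dict_point[index][i] // dict_rgb[index]
--
--     return dict_point
-- ===== SOURCE B (Python) =====
-- def compute_point(image):
--     # Declarative: flat pixel list for counts, grid of 1-based coordinates, per-colour filtered sums.
--     h = len(image)
--     w = len(image[0]) if image else 0
--     flat = [tuple(p) for row in image for p in row]
--     grid = [(x + 1, y + 1, tuple(image[x][y])) for x in range(h) for y in range(w)]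
--     keys = dict.fromkeys(t for _, _, t in grid)
--     return {k: [sum(x for x, _, t in grid if t == k) // flat.count(k),
--                 sum(y for _, y, t in grid if t == k) // flat.count(k)] for k in keys}
-- ===== Notes on version B (the rewrite author's own statement) =====
-- stated objective: alternative
-- what changed: B replaces A's incremental dict mutation (a count dict built by a helper plus an index-driven sum dict updated in place, then an in-place division loop) by a declarative computation: a flat pixel list whose .count gives each colour's count, a comprehension-built 1-based coordinate grid, first-occurrence keys via dict.fromkeys, and per-colour filtered sums divided in a single comprehension.
import Mathlib
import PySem

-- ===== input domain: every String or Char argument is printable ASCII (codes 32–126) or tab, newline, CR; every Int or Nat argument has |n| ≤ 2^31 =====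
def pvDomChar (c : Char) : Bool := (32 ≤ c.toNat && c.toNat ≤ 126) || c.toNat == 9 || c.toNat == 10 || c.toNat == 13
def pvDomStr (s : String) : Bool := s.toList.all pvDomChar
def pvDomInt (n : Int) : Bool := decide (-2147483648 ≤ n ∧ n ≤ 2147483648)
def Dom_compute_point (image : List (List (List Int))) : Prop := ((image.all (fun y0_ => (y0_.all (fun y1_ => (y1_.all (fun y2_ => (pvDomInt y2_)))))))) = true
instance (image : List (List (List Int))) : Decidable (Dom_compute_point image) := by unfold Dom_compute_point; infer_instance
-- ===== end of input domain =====

-- B replaces A's incremental dict mutation by a declarative form: a flat pixel list for the counts,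
-- a comprehension-built coordinate grid, and per-colour filtered sums; same return value wherever A returns.

-- ===== PORT A =====
def compute_counts (image : List (List (List Int))) : PySem.Dict (List Int) Int :=
  image.foldl (fun d i =>
    i.foldl (fun d j =>
      if d.contains j = false then d.insert j 1
      else d.modify j 0 (· + 1)) d) PySem.Dict.empty

def compute_point (image : List (List (List Int))) : List (List Int × List Int) :=
  let dict_rgb := compute_counts image
  let dict_point :=
    (PySem.List.pyRange 0 (PySem.List.len image) 1).foldl (fun d x =>
      (PySem.List.pyRange 0 (PySem.List.len (PySem.List.pyGetD image 0 [])) 1).foldl (fun d y =>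
        let t := PySem.List.pyGetD (PySem.List.pyGetD image x []) y []
        if d.contains t = false then d.insert t [x + 1, y + 1]
        else
          let d := d.modify t [] (fun v => PySem.List.pySetD v 0 (PySem.List.pyGetD v 0 0 + (x + 1)))
          d.modify t [] (fun v => PySem.List.pySetD v 1 (PySem.List.pyGetD v 1 0 + (y + 1)))) d)
      PySem.Dict.empty
  dict_point.items.map (fun p =>
    (p.1, (PySem.List.pyRange 0 (PySem.List.len p.2) 1).foldl
      (fun v i => PySem.List.pySetD v i
        (PySem.Int.floordiv (PySem.List.pyGetD v i 0) (dict_rgb.getD p.1 0))) p.2))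

-- ===== PORT B =====
def compute_point_alt (image : List (List (List Int))) : List (List Int × List Int) :=
  let h := PySem.List.len image
  let w := if image = [] then (0 : Int) else PySem.List.len (PySem.List.pyGetD image 0 [])
  let flat := image.flatMap (fun row => row.map (fun p => p))
  let grid := (PySem.List.pyRange 0 h 1).flatMap (fun x =>
    (PySem.List.pyRange 0 w 1).map (fun y =>
      (x + 1, y + 1, PySem.List.pyGetD (PySem.List.pyGetD image x []) y [])))
  let keys := PySem.List.dedup (grid.map (fun g => g.2.2))
  keys.map (fun k =>
    (k, [PySem.Int.floordiv ((grid.filter (fun g => g.2.2 == k)).map (fun g => g.1)).sum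
           ((PySem.List.count flat k : Nat) : Int),
         PySem.Int.floordiv ((grid.filter (fun g => g.2.2 == k)).map (fun g => g.2.1)).sum
           ((PySem.List.count flat k : Nat) : Int)]))

-- ===== PRECONDITION & SPEC =====
-- Pre_ excludes exactly the inputs on which A raises IndexError: images with a row shorter than the
-- first row (A indexes every row up to len(image[0])).
def Pre_compute_point (image : List (List (List Int))) : Prop :=
  ∀ row ∈ image, (image.headD []).length ≤ row.length
instance (image : List (List (List Int))) : Decidable (Pre_compute_point image) := by
  unfold Pre_compute_point; infer_instance

def pvWitness_compute_point : List (List (List Int)) := [[[1], [2]], [[3], [1]]]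

def Spec_compute_point (image : List (List (List Int))) (out : List (List Int × List Int)) : Prop :=
  out = compute_point_alt image
instance (image : List (List (List Int))) (out : List (List Int × List Int)) : Decidable (Spec_compute_point image out) := by
  unfold Spec_compute_point; infer_instance

-- ===== CLAIM (what is proved, stated in full; the proofs are below) =====
def Claim_equal_compute_point : Prop :=
  ∀ (image : List (List (List Int))), Dom_compute_point image → Pre_compute_point image →
    Spec_compute_point image (compute_point image)

-- ===== LEMMAS AND PROOFS =====

-- value-map over a dict's entries (keys untouched)
def pvMapVal {ν μ : Type} (f : ν → μ) (d : PySem.Dict (List Int) ν) : PySem.Dict (List Int) μ :=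
  PySem.Dict.mk (d.items.map (fun e => (e.1, f e.2)))

theorem pvContains_mapVal {ν μ : Type} (f : ν → μ) (d : PySem.Dict (List Int) ν) (k : List Int) :
    (pvMapVal f d).contains k = d.contains k := by
  simp [pvMapVal, PySem.Dict.contains, List.any_map, Function.comp_def]

theorem pvGet?_mapVal {ν μ : Type} (f : ν → μ) (d : PySem.Dict (List Int) ν) (k : List Int) :
    (pvMapVal f d).get? k = (d.get? k).map f := by
  simp [pvMapVal, PySem.Dict.get?, List.find?_map, Function.comp_def]

theorem pvInsert_mapVal {ν μ : Type} (f : ν → μ) (d : PySem.Dict (List Int) ν) (k : List Int) (v : ν) :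
    pvMapVal f (d.insert k v) = (pvMapVal f d).insert k (f v) := by
  by_cases h : d.contains k = true
  · have h2 : (pvMapVal f d).contains k = true := by rw [pvContains_mapVal]; exact h
    apply PySem.Dict.ext
    simp only [PySem.Dict.insert, h, h2, if_pos]
    simp only [pvMapVal, List.map_map]
    apply List.map_congr_left
    intro e _
    by_cases he : e.1 = k <;> simp [he]
  · have h2 : ¬ (pvMapVal f d).contains k = true := by rw [pvContains_mapVal]; exact h
    apply PySem.Dict.ext
    simp only [PySem.Dict.insert, if_neg h, if_neg h2]
    simp [pvMapVal]

theorem pvGetD_mapVal_of_get? {ν μ : Type} (f : ν → μ) (d : PySem.Dict (List Int) ν)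
    (k : List Int) (v : ν) (dflt : μ) (h : d.get? k = some v) :
    (pvMapVal f d).getD k dflt = f v := by
  simp [PySem.Dict.getD, pvGet?_mapVal, h]

theorem pvGet?_some_of_contains {ν : Type} (a : PySem.Dict (List Int) ν) (t : List Int)
    (hc : a.contains t = true) : ∃ v, a.get? t = some v := by
  have hsome : (a.get? t).isSome = true := by
    rw [← PySem.Dict.contains_eq_isSome_get?]; exact hc
  exact Option.isSome_iff_exists.mp hsome

-- the two dict-building loop bodies, over the 1-based pixel stream (x, y, pixel)
def pvStepP (a : PySem.Dict (List Int) (Int × Int)) (z : Int × Int × List Int) :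
    PySem.Dict (List Int) (Int × Int) :=
  let s := a.getD z.2.2 (0, 0)
  a.insert z.2.2 (s.1 + z.1, s.2 + z.2.1)

def pvStepA (d : PySem.Dict (List Int) (List Int)) (z : Int × Int × List Int) :
    PySem.Dict (List Int) (List Int) :=
  if d.contains z.2.2 = false then d.insert z.2.2 [z.1, z.2.1]
  else
    let d := d.modify z.2.2 [] (fun v => PySem.List.pySetD v 0 (PySem.List.pyGetD v 0 0 + z.1))
    d.modify z.2.2 [] (fun v => PySem.List.pySetD v 1 (PySem.List.pyGetD v 1 0 + z.2.1))

def pvPo (s : Int × Int) : List Int := [s.1, s.2]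

theorem pvStepA_mapVal (a : PySem.Dict (List Int) (Int × Int)) (z : Int × Int × List Int) :
    pvStepA (pvMapVal pvPo a) z = pvMapVal pvPo (pvStepP a z) := by
  by_cases hc : a.contains z.2.2 = true
  · obtain ⟨v, hv⟩ := pvGet?_some_of_contains a z.2.2 hc
    have hgd : a.getD z.2.2 (0, 0) = v := by simp [PySem.Dict.getD, hv]
    have hmc : (pvMapVal pvPo a).contains z.2.2 = true := by rw [pvContains_mapVal]; exact hc
    have hmg : (pvMapVal pvPo a).getD z.2.2 [] = pvPo v := pvGetD_mapVal_of_get? _ _ _ _ _ hv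
    simp [pvStepA, pvStepP, PySem.Dict.modify, hmc, hgd, hmg, pvPo,
      PySem.Dict.getD_insert_self, PySem.Dict.insert_insert_self, pvInsert_mapVal,
      PySem.List.pySetD, PySem.List.pySet?, PySem.List.pyGetD, PySem.List.pyGet?,
      PySem.List.pyIdx?]
  · have hc' : a.contains z.2.2 = false := by simpa using hc
    have hgd : a.getD z.2.2 (0, 0) = (0, 0) := PySem.Dict.getD_of_not_contains _ _ hc'
    have hmc : (pvMapVal pvPo a).contains z.2.2 = false := by rw [pvContains_mapVal]; exact hc'
    simp [pvStepA, pvStepP, hmc, hgd, pvInsert_mapVal, pvPo]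

theorem pvFoldP (l : List (Int × Int × List Int)) (a : PySem.Dict (List Int) (Int × Int)) :
    l.foldl pvStepA (pvMapVal pvPo a) = pvMapVal pvPo (l.foldl pvStepP a) := by
  induction l generalizing a with
  | nil => rfl
  | cons z l ih =>
    simp only [List.foldl_cons, pvStepA_mapVal]
    exact ih (pvStepP a z)

-- the accumulating pair-fold, characterised: first-occurrence keys with per-key filtered sums
theorem pvCharFold (l : List (Int × Int × List Int)) :
    (l.foldl pvStepP PySem.Dict.empty).items
    = (PySem.List.dedup (l.map (fun g => g.2.2))).map (fun k =>
        (k, (((l.filter (fun g => g.2.2 == k)).map (fun g => g.1)).sum,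
             ((l.filter (fun g => g.2.2 == k)).map (fun g => g.2.1)).sum))) := by
  induction l using List.reverseRecOn with
  | nil => rfl
  | append_singleton l z ih =>
    rw [List.foldl_append, List.foldl_cons, List.foldl_nil]
    have hkeys : (l.foldl pvStepP PySem.Dict.empty).keys
        = PySem.List.dedup (l.map (fun g => g.2.2)) := by
      show (l.foldl pvStepP PySem.Dict.empty).items.map (fun p => p.1) = _
      rw [ih, List.map_map]
      simp [Function.comp_def]
    have hnd : (l.foldl pvStepP PySem.Dict.empty).keys.Nodup := by
      rw [hkeys]; exact PySem.Set.nodup_ofList _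
    by_cases hc : (l.foldl pvStepP PySem.Dict.empty).contains z.2.2 = true
    · have hmem : z.2.2 ∈ l.map (fun g => g.2.2) := by
        have hmem0 := (PySem.Dict.contains_iff_mem_keys _ _).mp hc
        rw [hkeys] at hmem0
        simpa [PySem.List.dedup, PySem.Set.mem_ofList] using hmem0
      have hded : PySem.List.dedup ((l ++ [z]).map (fun g => g.2.2))
          = PySem.List.dedup (l.map (fun g => g.2.2)) := by
        show PySem.Set.ofList _ = PySem.Set.ofList _
        rw [List.map_append, List.map_singleton, PySem.Set.ofList_append_singleton,
          PySem.Set.add_of_mem (by rw [PySem.Set.mem_ofList]; exact hmem)]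
      have hget : (l.foldl pvStepP PySem.Dict.empty).getD z.2.2 (0, 0)
          = (((l.filter (fun g => g.2.2 == z.2.2)).map (fun g => g.1)).sum,
             ((l.filter (fun g => g.2.2 == z.2.2)).map (fun g => g.2.1)).sum) := by
        apply PySem.Dict.getD_of_mem_items _ ?_ hnd
        rw [ih]
        exact List.mem_map_of_mem (by rw [PySem.List.dedup]; rw [PySem.Set.mem_ofList]; exact hmem)
      simp only [pvStepP, hget]
      rw [PySem.Dict.items_insert_of_contains _ _ hc, ih, List.map_map, hded]
      apply List.map_congr_left
      intro k hk
      by_cases hkz : k = z.2.2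
      · subst hkz
        simp [List.filter_append, List.sum_append]
      · have hzk : ¬ (z.2.2 == k) = true := by simp [beq_iff_eq]; exact fun he => hkz he.symm
        simp [List.filter_append, hkz, hzk]
    · have hc' : (l.foldl pvStepP PySem.Dict.empty).contains z.2.2 = false := by simpa using hc
      have hnotmem : z.2.2 ∉ l.map (fun g => g.2.2) := by
        intro hmem
        apply hc
        rw [PySem.Dict.contains_iff_mem_keys, hkeys, PySem.List.dedup, PySem.Set.mem_ofList]
        exact hmem
      have hded : PySem.List.dedup ((l ++ [z]).map (fun g => g.2.2))
          = PySem.List.dedup (l.map (fun g => g.2.2)) ++ [z.2.2] := by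
        show PySem.Set.ofList _ = PySem.Set.ofList _ ++ [z.2.2]
        rw [List.map_append, List.map_singleton, PySem.Set.ofList_append_singleton,
          PySem.Set.add_of_not_mem (by rw [PySem.Set.mem_ofList]; exact hnotmem)]
      have hfilnil : l.filter (fun g => g.2.2 == z.2.2) = [] := by
        rw [List.filter_eq_nil_iff]
        intro g hg hgz
        rw [beq_iff_eq] at hgz
        exact hnotmem (hgz ▸ List.mem_map_of_mem hg)
      simp only [pvStepP, PySem.Dict.getD_of_not_contains _ _ hc']
      rw [PySem.Dict.items_insert_of_not_contains _ _ hc', ih, hded, List.map_append]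
      congr 1
      · apply List.map_congr_left
        intro k hk
        have hkmem : k ∈ l.map (fun g => g.2.2) := by
          have := hk
          rw [PySem.List.dedup, PySem.Set.mem_ofList] at this
          exact this
        have hkz : ¬ (z.2.2 == k) = true := by
          rw [beq_iff_eq]
          intro he
          exact hnotmem (he ▸ hkmem)
        simp [List.filter_append, hkz]
      · simp [List.filter_append, hfilnil]

-- A's grid fold over index ranges is the fold of pvStepA over B's coordinate grid
theorem pvPointFold_eq (image : List (List (List Int))) :
    (PySem.List.pyRange 0 (PySem.List.len image) 1).foldl (fun d x =>
      (PySem.List.pyRange 0 (PySem.List.len (PySem.List.pyGetD image 0 [])) 1).foldl (fun d y =>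
        let t := PySem.List.pyGetD (PySem.List.pyGetD image x []) y []
        if d.contains t = false then d.insert t [x + 1, y + 1]
        else
          let d := d.modify t [] (fun v => PySem.List.pySetD v 0 (PySem.List.pyGetD v 0 0 + (x + 1)))
          d.modify t [] (fun v => PySem.List.pySetD v 1 (PySem.List.pyGetD v 1 0 + (y + 1)))) d)
      PySem.Dict.empty
    = ((PySem.List.pyRange 0 (PySem.List.len image) 1).flatMap (fun x =>
        (PySem.List.pyRange 0 (if image = [] then (0 : Int) else PySem.List.len (PySem.List.pyGetD image 0 [])) 1).map (fun y =>
          (x + 1, y + 1, PySem.List.pyGetD (PySem.List.pyGetD image x []) y [])))).foldl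
        pvStepA PySem.Dict.empty := by
  cases image with
  | nil => rfl
  | cons r rest =>
    rw [if_neg (by simp)]
    rw [List.foldl_flatMap]
    simp only [List.foldl_map]
    rfl

-- the counts dict looks up to the flat pixel count
theorem pvCountsGetD (image : List (List (List Int))) (k : List Int) :
    (compute_counts image).getD k 0 = ((image.flatten.count k : Nat) : Int) := by
  unfold compute_counts
  rw [← List.foldl_flatten]
  have hstep : image.flatten.foldl (fun d j =>
        if d.contains j = false then d.insert j 1
        else d.modify j 0 (· + 1)) (PySem.Dict.empty : PySem.Dict (List Int) Int)
      = image.flatten.foldl (fun d x => d.insert x (d.getD x 0 + 1)) PySem.Dict.empty := by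
    apply PySem.List.foldl_congr_mem
    intro d x _
    by_cases hcx : d.contains x = true
    · simp [hcx, PySem.Dict.modify]
    · have hcx' : d.contains x = false := by simpa using hcx
      rw [if_pos hcx', PySem.Dict.getD_of_not_contains _ _ hcx']
      norm_num
  rw [hstep, PySem.Dict.getD_foldl_insert_add_one]
  simp [PySem.Dict.getD_empty]

theorem pvFlat_eq (image : List (List (List Int))) :
    image.flatMap (fun row => row.map (fun p => p)) = image.flatten := by
  simp

theorem pvDivFold (a b c : Int) :
    (PySem.List.pyRange 0 (PySem.List.len [a, b]) 1).foldl
      (fun v i => PySem.List.pySetD v i (PySem.Int.floordiv (PySem.List.pyGetD v i 0) c)) [a, b]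
    = [PySem.Int.floordiv a c, PySem.Int.floordiv b c] := by
  have h2 : PySem.List.len [a, b] = (2 : Int) := by simp [PySem.List.len_eq]
  rw [h2]
  have hr : PySem.List.pyRange 0 2 1 = [0, 1] := by decide
  rw [hr]
  simp [PySem.List.pySetD, PySem.List.pySet?, PySem.List.pyGetD, PySem.List.pyGet?,
    PySem.List.pyIdx?]

-- ===== VERDICT (by name: the statement is the Claim_ definition above) =====
theorem compute_point_spec : Claim_equal_compute_point := by
  intro image _ _
  unfold Spec_compute_point
  simp only [compute_point, compute_point_alt]
  rw [pvPointFold_eq]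
  rw [show ((PySem.List.pyRange 0 (PySem.List.len image) 1).flatMap (fun x =>
        (PySem.List.pyRange 0 (if image = [] then (0 : Int) else PySem.List.len (PySem.List.pyGetD image 0 [])) 1).map (fun y =>
          (x + 1, y + 1, PySem.List.pyGetD (PySem.List.pyGetD image x []) y [])))).foldl
        pvStepA PySem.Dict.empty
      = pvMapVal pvPo (((PySem.List.pyRange 0 (PySem.List.len image) 1).flatMap (fun x =>
        (PySem.List.pyRange 0 (if image = [] then (0 : Int) else PySem.List.len (PySem.List.pyGetD image 0 [])) 1).map (fun y =>
          (x + 1, y + 1, PySem.List.pyGetD (PySem.List.pyGetD image x []) y [])))).foldl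
        pvStepP PySem.Dict.empty) from pvFoldP _ PySem.Dict.empty]
  rw [show ∀ (X : PySem.Dict (List Int) (Int × Int)),
      (pvMapVal pvPo X).items = X.items.map (fun e => (e.1, pvPo e.2)) from fun X => rfl]
  rw [pvCharFold, List.map_map, List.map_map]
  apply List.map_congr_left
  intro k hk
  simp only [Function.comp_apply, pvPo]
  rw [pvCountsGetD, pvDivFold]
  rw [pvFlat_eq]
  simp [PySem.List.count_eq]
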